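-- pv_equiv track=rewrite | github.com/filippak/rc-answer-generation | model/evaluation/helper.py | get_token_segments
-- ===== SOURCE A (Python) =====
-- def get_token_segments(labels):
--     labels_stats = []
--     for idx, label in enumerate(labels):
--         if label == 1 and idx+1 < len(labels):
--             next_label = labels[idx+1]
--             count = 2
--             while idx+count < len(labels) and next_label in [2, -100]:
--                 next_label = labels[idx+count]
--                 count += 1
--             labels_stats.append((idx, count-1))
--     return labels_stats
-- ===== SOURCE B (Python) =====
-- def get_token_segments(labels):
--     # One forward pass carrying the segment currently being built.
--     out = []
--     open_seg = None  # (start_idx, length)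
--     for p, lab in enumerate(labels):
--         if lab == 1:
--             if open_seg is not None:
--                 out.append(open_seg)
--             open_seg = (p, 1)
--         elif lab in (2, -100):
--             if open_seg is not None:
--                 open_seg = (open_seg[0], open_seg[1] + 1)
--         else:
--             if open_seg is not None:
--                 out.append(open_seg)
--                 open_seg = None
--     if open_seg is not None:
--         out.append(open_seg)
--     return out
-- ===== Notes on version B (the rewrite author's own statement) =====
-- stated objective: simpler
-- what changed: Replaced A's per-index inner while-loop that rescans the run of 2/-100 labels after every 1 with a single forward pass carrying one open (start, length) segment state.
-- intended difference: On inputs where a 1-label's segment of following 2/-100 tokens runs to the very end of the list, A's off-by-one drops the final token from the count (and drops a segment whose 1 is the last element entirely), while B reports the full segment, which is the intended token-segment statistic. — e.g. on get_token_segments([1, 2]): A returns [(0, 1)], B returns [(0, 2)]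
import Mathlib
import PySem

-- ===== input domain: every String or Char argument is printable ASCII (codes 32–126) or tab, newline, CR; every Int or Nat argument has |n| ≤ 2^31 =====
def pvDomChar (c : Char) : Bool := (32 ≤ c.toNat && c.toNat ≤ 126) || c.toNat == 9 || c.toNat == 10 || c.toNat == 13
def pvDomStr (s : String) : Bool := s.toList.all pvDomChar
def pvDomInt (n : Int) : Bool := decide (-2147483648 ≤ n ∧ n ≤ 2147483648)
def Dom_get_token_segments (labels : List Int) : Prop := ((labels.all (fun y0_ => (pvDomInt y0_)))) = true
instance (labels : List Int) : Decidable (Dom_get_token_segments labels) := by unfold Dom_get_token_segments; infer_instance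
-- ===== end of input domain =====

-- B replaces A's restart-and-rescan inner while loop by a single forward pass that
-- carries one open-segment state; objective: simpler (one pass, no nested scan).
-- On segments reaching the end of the list the two differ (see D_ below).

-- ===== PORT A =====
-- inner 'while idx+count < len(labels) and next_label in [2, -100]': fuel-bounded
-- recursion; fuel = labels.length suffices since count starts at 2 and each step
-- requires idx + count < len(labels).  The .getD 0 after pyGet? is never taken with
-- out-of-range index: the loop guard idx+count < len holds and idx+count ≥ 0.
def pvWhileA (labels : List Int) (idx : Int) (next_label : Int) (count : Int) : Nat → Int
  | 0 => count
  | fuel + 1 =>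
    if idx + count < (labels.length : Int) ∧ (next_label = 2 ∨ next_label = -100) then
      pvWhileA labels idx ((PySem.List.pyGet? labels (idx + count)).getD 0) (count + 1) fuel
    else count

-- 'for idx, label in enumerate(labels)' as recursion over the remaining suffix with idx
def pvGoA (labels : List Int) : List Int → Int → List (Int × Int) → List (Int × Int)
  | [], _, acc => acc
  | label :: rest, idx, acc =>
    if label = 1 ∧ idx + 1 < (labels.length : Int) then
      let next_label := (PySem.List.pyGet? labels (idx + 1)).getD 0
      let count := pvWhileA labels idx next_label 2 labels.length
      pvGoA labels rest (idx + 1) (acc ++ [(idx, count - 1)])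
    else
      pvGoA labels rest (idx + 1) acc

def get_token_segments (labels : List Int) : List (Int × Int) :=
  pvGoA labels labels 0 []

-- ===== PORT B =====
-- the for-loop of Source B: state (out, open_seg), p the enumerate index
def pvGoB : List Int → Int → List (Int × Int) → Option (Int × Int) → List (Int × Int)
  | [], _, out, openSeg => out ++ openSeg.toList
  | lab :: rest, p, out, openSeg =>
    if lab = 1 then
      pvGoB rest (p + 1) (out ++ openSeg.toList) (some (p, 1))
    else if lab = 2 ∨ lab = -100 then
      match openSeg with
      | some (s, l) => pvGoB rest (p + 1) out (some (s, l + 1))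
      | none => pvGoB rest (p + 1) out none
    else
      pvGoB rest (p + 1) (out ++ openSeg.toList) none

def get_token_segments_alt (labels : List Int) : List (Int × Int) :=
  pvGoB labels 0 [] none

-- ===== PRECONDITION & SPEC =====
-- On inputs where some 1-label is followed only by 2/-100 tokens up to the end of the
-- list, A's off-by-one drops the final token from that segment's count (and drops a
-- segment whose 1 is the last element entirely); B reports the full segment, the
-- intended statistic.
def D_get_token_segments (labels : List Int) : Prop :=
  ∃ i, i < labels.length ∧ labels.getD i 0 = 1 ∧
    ((labels.drop (i + 1)).all (fun x => x == 2 || x == -100)) = true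
instance (labels : List Int) : Decidable (D_get_token_segments labels) := by
  unfold D_get_token_segments; infer_instance

def Spec_get_token_segments (labels : List Int) (out : List (Int × Int)) : Prop :=
  ¬ D_get_token_segments labels → out = get_token_segments_alt labels
instance (labels : List Int) (out : List (Int × Int)) : Decidable (Spec_get_token_segments labels out) := by
  unfold Spec_get_token_segments; infer_instance

def pvDiffWitness_get_token_segments : List Int := [1, 2]
def pvDiffWitnessOut_get_token_segments : (List (Int × Int)) × (List (Int × Int)) :=
  ([(0, 1)], [(0, 2)])

-- ===== CLAIM (what is proved, stated in full; the proofs are below) =====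
def Claim_unchanged_get_token_segments : Prop := ∀ (labels : List Int), Dom_get_token_segments labels → Spec_get_token_segments labels (get_token_segments labels)
def Claim_changed_get_token_segments : Prop := Dom_get_token_segments (pvDiffWitness_get_token_segments) ∧ D_get_token_segments (pvDiffWitness_get_token_segments) ∧ get_token_segments (pvDiffWitness_get_token_segments) = pvDiffWitnessOut_get_token_segments.1 ∧ get_token_segments_alt (pvDiffWitness_get_token_segments) = pvDiffWitnessOut_get_token_segments.2 ∧ pvDiffWitnessOut_get_token_segments.1 ≠ pvDiffWitnessOut_get_token_segments.2
def Claim_exact_get_token_segments : Prop := ∀ (labels : List Int), Dom_get_token_segments labels → D_get_token_segments labels → get_token_segments labels ≠ get_token_segments_alt labels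

-- ===== LEMMAS AND PROOFS =====

-- length of the leading run of 2/-100 labels
def pvRun : List Int → Nat
  | [] => 0
  | x :: xs => if x = 2 ∨ x = -100 then pvRun xs + 1 else 0

-- reference form of A: segments of `xs` starting at absolute position p, truncated
def pvSeg (p : Int) : List Int → List (Int × Int)
  | [] => []
  | x :: xs =>
      (if x = 1 ∧ xs ≠ [] then [(p, ((min (pvRun xs + 1) xs.length : Nat) : Int))] else [])
        ++ pvSeg (p + 1) xs

-- reference form of B: full segments
def pvSegB (p : Int) : List Int → List (Int × Int)
  | [] => []
  | x :: xs =>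
      (if x = 1 then [(p, ((pvRun xs + 1 : Nat) : Int))] else []) ++ pvSegB (p + 1) xs

theorem pvRun_le (xs : List Int) : pvRun xs ≤ xs.length := by
  induction xs with
  | nil => simp [pvRun]
  | cons x xs ih =>
    by_cases h : x = 2 ∨ x = -100
    · simp only [pvRun, if_pos h, List.length_cons]; omega
    · simp only [pvRun, if_neg h]; omega

theorem pvRun_eq_length (xs : List Int) :
    pvRun xs = xs.length ↔ (xs.all (fun x => x == 2 || x == -100)) = true := by
  induction xs with
  | nil => simp [pvRun]
  | cons x xs ih =>
    simp only [pvRun, List.all_cons, List.length_cons]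
    by_cases h : x = 2 ∨ x = -100
    · have hle := pvRun_le xs
      rw [if_pos h]
      have hx : (x == 2 || x == -100) = true := by
        rcases h with h | h <;> simp [h]
      constructor
      · intro he
        rw [hx, ih.mp (by omega)]
        rfl
      · intro hb
        rw [Bool.and_eq_true] at hb
        rw [ih.mpr hb.2]
    · rw [if_neg h]
      have hx : ¬ ((x == 2 || x == -100) = true) := by simpa using h
      constructor
      · intro he; exact absurd he.symm (by omega)
      · intro hb
        rw [Bool.and_eq_true] at hb
        exact absurd hb.1 hx

theorem pvSegB_dropRun (labels : List Int) (p : Int) :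
    pvSegB p labels = pvSegB (p + (pvRun labels : Int)) (labels.drop (pvRun labels)) := by
  induction labels generalizing p with
  | nil => simp [pvRun]
  | cons x xs ih =>
    by_cases hx : x = 2 ∨ x = -100
    · have hx1 : x ≠ 1 := by rcases hx with h | h <;> simp [h]
      simp only [pvSegB, pvRun, if_pos hx, if_neg hx1]
      rw [ih (p + 1)]
      have : p + 1 + (pvRun xs : Int) = p + ((pvRun xs + 1 : Nat) : Int) := by push_cast; ring
      simp [this]
    · simp [pvRun, hx]

theorem pvWhileA_spec (labels : List Int) :
    ∀ (ys : List Int) (fuel : Nat) (j : Nat) (idx count : Int),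
      ys = labels.drop j → ys ≠ [] → idx + count = (j : Int) + 1 → ys.length ≤ fuel →
      pvWhileA labels idx ((labels[j]?).getD 0) count fuel
        = count + (min (pvRun ys) (ys.length - 1) : Int) := by
  intro ys
  induction ys with
  | nil => intro _ _ _ _ _ h; exact absurd rfl h
  | cons y tl ih =>
    intro fuel j idx count hdrop _ hic hfuel
    have hylen : j < labels.length := by
      by_contra h
      have : labels.drop j = [] := List.drop_eq_nil_of_le (by omega)
      rw [this] at hdrop; simp at hdrop
    have hj : labels[j]? = some y := by
      have := congrArg List.head? hdrop
      simpa [List.head?_drop] using this.symm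
    obtain ⟨f, rfl⟩ : ∃ f, fuel = f + 1 := ⟨fuel - 1, by simp at hfuel ⊢; omega⟩
    have htl : tl = labels.drop (j + 1) := by
      have := congrArg List.tail hdrop; simpa [List.tail_drop] using this
    have hlen : (labels.length : Int) = (j : Int) + 1 + tl.length := by
      have := congrArg List.length hdrop
      simp [List.length_drop] at this
      omega
    rw [hj]
    simp only [pvWhileA, Option.getD_some]
    by_cases hy : y = 2 ∨ y = -100
    · by_cases htl0 : tl = []
      · subst htl0
        have : ¬ (idx + count < (labels.length : Int) ∧ (y = 2 ∨ y = -100)) := by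
          simp at hlen; omega
        rw [if_neg this]
        simp [pvRun, hy]
      · have hcond : idx + count < (labels.length : Int) ∧ (y = 2 ∨ y = -100) := by
          constructor
          · have : 0 < tl.length := List.length_pos_iff.mpr htl0
            omega
          · exact hy
        rw [if_pos hcond]
        have hnext : PySem.List.pyGet? labels (idx + count) = labels[j + 1]? := by
          rw [hic]
          have : ((j : Int) + 1) = ((j + 1 : Nat) : Int) := by push_cast; ring
          rw [this, PySem.List.pyGet?_natCast]
        rw [hnext]
        rw [ih f (j + 1) idx (count + 1) htl htl0 (by push_cast; omega)
              (by simp at hfuel ⊢; omega)]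
        have h1 : 0 < tl.length := List.length_pos_iff.mpr htl0
        have : (min (pvRun (y :: tl)) ((y :: tl).length - 1) : Int)
             = 1 + (min (pvRun tl) (tl.length - 1) : Int) := by
          simp only [pvRun, if_pos hy, List.length_cons]
          omega
        omega
    · have : ¬ (idx + count < (labels.length : Int) ∧ (y = 2 ∨ y = -100)) := by
        intro h; exact hy h.2
      rw [if_neg this]
      simp [pvRun, hy]

theorem pvGoA_spec (labels : List Int) :
    ∀ (ys : List Int) (i : Nat) (acc : List (Int × Int)),
      ys = labels.drop i →
      pvGoA labels ys (i : Int) acc = acc ++ pvSeg (i : Int) ys := by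
  intro ys
  induction ys with
  | nil => intro i acc _; simp [pvGoA, pvSeg]
  | cons lab rest ih =>
    intro i acc hdrop
    have hrest : rest = labels.drop (i + 1) := by
      have := congrArg List.tail hdrop; simpa [List.tail_drop] using this
    have hilen : i < labels.length := by
      by_contra h
      have : labels.drop i = [] := List.drop_eq_nil_of_le (by omega)
      rw [this] at hdrop; simp at hdrop
    have hlen : labels.length = i + 1 + rest.length := by
      have := congrArg List.length hdrop
      simp [List.length_drop] at this
      omega
    by_cases hc : lab = 1 ∧ (i : Int) + 1 < (labels.length : Int)
    · have hrest0 : rest ≠ [] := by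
        intro h; rw [h] at hlen; simp at hlen
        have := hc.2; omega
      simp only [pvGoA, if_pos hc]
      have hnext : PySem.List.pyGet? labels ((i : Int) + 1) = labels[i + 1]? := by
        have : ((i : Int) + 1) = ((i + 1 : Nat) : Int) := by push_cast; ring
        rw [this, PySem.List.pyGet?_natCast]
      rw [hnext,
          pvWhileA_spec labels rest labels.length (i + 1) (i : Int) 2 hrest hrest0
            (by push_cast; ring) (by omega)]
      have hca : ((i : Int) + 1) = ((i + 1 : Nat) : Int) := by push_cast; ring
      rw [hca, ih (i + 1) _ hrest]
      have h1 : 0 < rest.length := List.length_pos_iff.mpr hrest0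
      have hval : (2 : Int) + (min (pvRun rest) (rest.length - 1) : Int) - 1
          = ((min (pvRun rest + 1) rest.length : Nat) : Int) := by
        push_cast; omega
      simp only [pvSeg, if_pos (And.intro hc.1 hrest0), hval, ← hca]
      simp
    · simp only [pvGoA, if_neg hc]
      have hca : ((i : Int) + 1) = ((i + 1 : Nat) : Int) := by push_cast; ring
      rw [hca, ih (i + 1) _ hrest]
      have : ¬ (lab = 1 ∧ rest ≠ []) := by
        intro h
        apply hc
        refine ⟨h.1, ?_⟩
        have := List.length_pos_iff.mpr h.2
        omega
      simp [pvSeg, this, ← hca]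

-- invariant for B's single pass: the open-segment state absorbs the leading run
theorem pvGoB_spec :
    ∀ (xs : List Int),
      (∀ (p : Int) (out : List (Int × Int)),
        pvGoB xs p out none = out ++ pvSegB p xs)
      ∧ (∀ (p : Int) (out : List (Int × Int)) (s l : Int),
        pvGoB xs p out (some (s, l)) =
          out ++ [(s, l + (pvRun xs : Int))]
            ++ pvSegB (p + (pvRun xs : Int)) (xs.drop (pvRun xs))) := by
  intro xs
  induction xs with
  | nil =>
    constructor
    · intro p out; simp [pvGoB, pvSegB]
    · intro p out s l; simp [pvGoB, pvSegB, pvRun]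
  | cons x tl ih =>
    constructor
    · intro p out
      by_cases hx1 : x = 1
      · subst hx1
        simp only [pvGoB, reduceIte, Option.toList_none, List.append_nil]
        rw [(ih.2) (p + 1) out p 1, pvSegB]
        rw [pvSegB_dropRun tl (p + 1)]
        simp only [reduceIte]
        have : (1 : Int) + (pvRun tl : Int) = ((pvRun tl + 1 : Nat) : Int) := by push_cast; ring
        simp [this]
      · by_cases hxS : x = 2 ∨ x = -100
        · have : x ≠ 1 := hx1
          simp only [pvGoB, if_neg hx1, if_pos hxS]
          rw [(ih.1) (p + 1) out]
          simp [pvSegB, hx1]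
        · simp only [pvGoB, if_neg hx1, if_neg hxS, Option.toList_none, List.append_nil]
          rw [(ih.1) (p + 1) out]
          simp [pvSegB, hx1]
    · intro p out s l
      by_cases hx1 : x = 1
      · subst hx1
        have hrun : pvRun (1 :: tl) = 0 := by simp [pvRun]
        simp only [pvGoB, reduceIte, Option.toList_some, hrun, Nat.cast_zero, add_zero,
          List.drop_zero]
        rw [(ih.2) (p + 1) (out ++ [(s, l)]) p 1, pvSegB]
        rw [pvSegB_dropRun tl (p + 1)]
        simp only [reduceIte]
        have : (1 : Int) + (pvRun tl : Int) = ((pvRun tl + 1 : Nat) : Int) := by push_cast; ring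
        simp [this]
      · by_cases hxS : x = 2 ∨ x = -100
        · have hrun : pvRun (x :: tl) = pvRun tl + 1 := by simp [pvRun, hxS]
          simp only [pvGoB, if_neg hx1, if_pos hxS]
          rw [(ih.2) (p + 1) out s (l + 1)]
          have h1 : l + 1 + (pvRun tl : Int) = l + (pvRun (x :: tl) : Int) := by
            rw [hrun]; push_cast; ring
          have h2 : (x :: tl).drop (pvRun (x :: tl)) = tl.drop (pvRun tl) := by
            rw [hrun]; simp
          have h3 : p + 1 + (pvRun tl : Int) = p + (pvRun (x :: tl) : Int) := by
            rw [hrun]; push_cast; ring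
          rw [h1, h2, h3]
        · have hrun : pvRun (x :: tl) = 0 := by simp [pvRun, hxS]
          simp only [pvGoB, if_neg hx1, if_neg hxS, Option.toList_some]
          rw [(ih.1) (p + 1) (out ++ [(s, l)])]
          simp [hrun, pvSegB, hx1]

-- outside D_, every 1 is eventually closed before the end, so truncated = full
theorem pvSeg_eq_pvSegB (xs : List Int) (p : Int)
    (h : ∀ i, i < xs.length → xs.getD i 0 = 1 →
      ¬ ((xs.drop (i + 1)).all (fun x => x == 2 || x == -100)) = true) :
    pvSeg p xs = pvSegB p xs := by
  induction xs generalizing p with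
  | nil => rfl
  | cons x tl ih =>
    have htail : ∀ i, i < tl.length → tl.getD i 0 = 1 →
        ¬ ((tl.drop (i + 1)).all (fun x => x == 2 || x == -100)) = true := by
      intro i hi h1
      have := h (i + 1) (by simp; omega) (by simpa using h1)
      simpa using this
    by_cases hx1 : x = 1
    · have h0 := h 0 (by simp) (by simp [hx1])
      simp only [List.drop_succ_cons, List.drop_zero] at h0
      have htl0 : tl ≠ [] := by intro he; subst he; simp at h0
      have hrun : pvRun tl < tl.length := by
        have hle := pvRun_le tl
        have hne : pvRun tl ≠ tl.length := fun he => h0 ((pvRun_eq_length tl).mp he)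
        omega
      have hmin : min (pvRun tl + 1) tl.length = pvRun tl + 1 := by omega
      simp only [pvSeg, pvSegB, if_pos (And.intro hx1 htl0), if_pos hx1, hmin]
      rw [ih (p + 1) htail]
    · have : ¬ (x = 1 ∧ tl ≠ []) := by intro hh; exact hx1 hh.1
      simp only [pvSeg, pvSegB, if_neg this, if_neg hx1, List.nil_append]
      exact ih (p + 1) htail

-- inside D_: the two reference lists differ (used for Claim_exact_)
theorem pvSeg_ne_pvSegB (xs : List Int) (p : Int)
    (h : ∃ i, i < xs.length ∧ xs.getD i 0 = 1 ∧
      ((xs.drop (i + 1)).all (fun x => x == 2 || x == -100)) = true) :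
    pvSeg p xs ≠ pvSegB p xs := by
  induction xs generalizing p with
  | nil => obtain ⟨i, hi, _⟩ := h; simp at hi
  | cons x tl ih =>
    obtain ⟨i, hi, h1, hall⟩ := h
    by_cases hx1 : x = 1
    · -- no 1 occurs in an all-run list, so pvSeg/pvSegB of such tails are []
      by_cases hta : (tl.all (fun x => x == 2 || x == -100)) = true
      · -- head witnesses: truncated vs full differ
        have hrun : pvRun tl = tl.length := (pvRun_eq_length tl).mpr hta
        by_cases htl0 : tl = []
        · subst htl0
          simp [pvSeg, pvSegB, hx1]
        · have hpos : 0 < tl.length := List.length_pos_iff.mpr htl0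
          have hmin : min (pvRun tl + 1) tl.length = tl.length := by omega
          -- tails: both pvSeg and pvSegB of an all-run list are []
          have hseg : ∀ q, pvSeg q tl = [] ∧ pvSegB q tl = [] := by
            clear ih hi h1 hall i hrun hmin hpos htl0
            induction tl with
            | nil => intro q; simp [pvSeg, pvSegB]
            | cons y ys ihy =>
              intro q
              simp only [List.all_cons, Bool.and_eq_true] at hta
              have hy : y = 2 ∨ y = -100 := by
                rcases hta with ⟨hy, _⟩
                simp at hy
                rcases hy with h | h <;> [left; right] <;> simp [h]
              have hy1 : y ≠ 1 := by rcases hy with h | h <;> simp [h]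
              have := ihy hta.2 (q := q + 1)
              simp [pvSeg, pvSegB, hy1, this.1, this.2]
          intro he
          simp only [pvSeg, pvSegB, if_pos (And.intro hx1 htl0), if_pos hx1, hmin,
            (hseg (p + 1)).1, (hseg (p + 1)).2, List.append_nil] at he
          have := (List.cons.injEq _ _ _ _).mp he
          have h2 := (Prod.mk.injEq _ _ _ _).mp this.1
          omega
      · -- witness is in the tail; heads are equal singletons (or equal empties)
        have hi' : i ≠ 0 := by
          intro he; subst he
          simp only [List.drop_succ_cons, List.drop_zero] at hall
          exact hta hall
        obtain ⟨j, rfl⟩ : ∃ j, i = j + 1 := ⟨i - 1, by omega⟩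
        have hwit : ∃ k, k < tl.length ∧ tl.getD k 0 = 1 ∧
            ((tl.drop (k + 1)).all (fun x => x == 2 || x == -100)) = true := by
          refine ⟨j, by simp at hi; omega, by simpa using h1, by simpa using hall⟩
        have htl0 : tl ≠ [] := by
          intro he; subst he; obtain ⟨k, hk, _⟩ := hwit; simp at hk
        have hrun : pvRun tl < tl.length := by
          have hle := pvRun_le tl
          have hne : pvRun tl ≠ tl.length := fun he => hta ((pvRun_eq_length tl).mp he)
          omega
        have hmin : min (pvRun tl + 1) tl.length = pvRun tl + 1 := by omega
        intro he
        simp only [pvSeg, pvSegB, if_pos (And.intro hx1 htl0), if_pos hx1, hmin,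
          List.cons_append, List.nil_append] at he
        exact ih (p + 1) hwit ((List.cons.injEq _ _ _ _).mp he).2
    · -- head produces nothing on either side; witness is in the tail
      have hi' : i ≠ 0 := by intro he; subst he; simp at h1; exact hx1 h1
      obtain ⟨j, rfl⟩ : ∃ j, i = j + 1 := ⟨i - 1, by omega⟩
      have hwit : ∃ k, k < tl.length ∧ tl.getD k 0 = 1 ∧
          ((tl.drop (k + 1)).all (fun x => x == 2 || x == -100)) = true := by
        refine ⟨j, by simp at hi; omega, by simpa using h1, by simpa using hall⟩
      have : ¬ (x = 1 ∧ tl ≠ []) := by intro hh; exact hx1 hh.1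
      simp only [pvSeg, pvSegB, if_neg this, if_neg hx1, List.nil_append]
      exact ih (p + 1) hwit

theorem getA_eq (labels : List Int) : get_token_segments labels = pvSeg 0 labels := by
  have := pvGoA_spec labels labels 0 [] (by simp)
  simpa [get_token_segments] using this

theorem getB_eq (labels : List Int) : get_token_segments_alt labels = pvSegB 0 labels := by
  have := (pvGoB_spec labels).1 0 []
  simpa [get_token_segments_alt] using this

-- ===== VERDICT (by name: the statements are the Claim_ definitions above) =====
theorem get_token_segments_spec : Claim_unchanged_get_token_segments := by
  intro labels _ hD
  rw [getA_eq, getB_eq]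
  apply pvSeg_eq_pvSegB
  intro i hi h1 hall
  exact hD ⟨i, hi, h1, hall⟩

theorem get_token_segments_changed : Claim_changed_get_token_segments := by
  unfold Claim_changed_get_token_segments; decide

theorem get_token_segments_tight : Claim_exact_get_token_segments := by
  intro labels _ hD
  rw [getA_eq, getB_eq]
  exact pvSeg_ne_pvSegB labels 0 hD
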